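-- pv_equiv track=rewrite | github.com/D17AN/University-Projects | Year 1 - Semester 1/Fundamentals of Programming/Labs/seminar_06_09/t1-911-BEJENARU-DAN/src/functions/functions.py | check_four_digits_value
-- ===== SOURCE A (Python) =====
-- def check_four_digits_value(value):
--     """
--     Check if a number has 4 digits
--     :param value:
--     :return:
--     """
--     digits = 0
--     if value == 0:
--         digits = 1
--
--     while value > 0:
--         digits = digits + 1
--         value = value // 10
--
--     if digits == 4:
--         return True
--
--     return False
-- ===== SOURCE B (Python) =====
-- def check_four_digits_value(value):
--     """
--     Check if a number has 4 digits
--     :param value: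
--     :return:
--     """
--     return 1000 <= value < 10000
-- ===== Notes on version B (the rewrite author's own statement) =====
-- stated objective: simpler
-- what changed: Replaced the digit-counting while loop with the constant-time closed-form range test 1000 <= value < 10000.
import Mathlib
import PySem

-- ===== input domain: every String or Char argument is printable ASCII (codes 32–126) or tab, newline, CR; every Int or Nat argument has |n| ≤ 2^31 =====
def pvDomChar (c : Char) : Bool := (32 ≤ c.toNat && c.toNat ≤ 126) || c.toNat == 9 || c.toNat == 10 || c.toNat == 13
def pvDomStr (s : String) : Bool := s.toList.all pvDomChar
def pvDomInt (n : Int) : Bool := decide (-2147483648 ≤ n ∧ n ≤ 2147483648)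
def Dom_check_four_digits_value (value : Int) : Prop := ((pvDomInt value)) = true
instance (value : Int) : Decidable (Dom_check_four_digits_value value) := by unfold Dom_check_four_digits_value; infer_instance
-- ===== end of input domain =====

-- B replaces A's digit-counting loop with the closed-form range test 1000 ≤ value < 10000 (simpler).

-- ===== PORT A =====
-- the 'while value > 0: digits += 1; value //= 10' loop of A
def pvCountLoop (value : Int) (digits : Int) : Int :=
  if h : 0 < value then
    pvCountLoop (PySem.Int.floordiv value 10) (digits + 1)
  else
    digits
termination_by value.toNat
decreasing_by
  have h10 : PySem.Int.floordiv value 10 = value / 10 :=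
    PySem.Int.floordiv_eq_ediv_of_pos (by omega)
  rw [h10]; omega

def check_four_digits_value (value : Int) : Bool :=
  let digits : Int := if value = 0 then 1 else 0
  let digits := pvCountLoop value digits
  if digits = 4 then true else false

-- ===== PORT B =====
def check_four_digits_value_alt (value : Int) : Bool :=
  1000 ≤ value && value < 10000

-- ===== PRECONDITION & SPEC =====
def Spec_check_four_digits_value (value : Int) (out : Bool) : Prop := out = check_four_digits_value_alt value
instance (value : Int) (out : Bool) : Decidable (Spec_check_four_digits_value value out) := by unfold Spec_check_four_digits_value; infer_instance

-- ===== CLAIM (what is proved, stated in full; the proofs are below) =====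
def Claim_equal_check_four_digits_value : Prop := ∀ (value : Int), Dom_check_four_digits_value value → Spec_check_four_digits_value value (check_four_digits_value value)

-- ===== LEMMAS AND PROOFS =====

theorem pvCountLoop_nonpos {v d : Int} (h : v ≤ 0) : pvCountLoop v d = d := by
  rw [pvCountLoop]; simp [show ¬ 0 < v by omega]

theorem pvCountLoop_pos {v d : Int} (h : 0 < v) :
    pvCountLoop v d = pvCountLoop (v / 10) (d + 1) := by
  rw [pvCountLoop]
  simp only [dif_pos h, PySem.Int.floordiv_eq_ediv_of_pos (show (0:Int) < 10 by omega)]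

theorem pvCountLoop_ge (v d : Int) : d ≤ pvCountLoop v d := by
  by_cases h : 0 < v
  · rw [pvCountLoop_pos h]
    have : d + 1 ≤ pvCountLoop (v / 10) (d + 1) := pvCountLoop_ge (v / 10) (d + 1)
    omega
  · rw [pvCountLoop_nonpos (by omega)]
termination_by v.toNat
decreasing_by omega

theorem pvCountLoop_ge2 {v d : Int} (h : 10 ≤ v) : d + 2 ≤ pvCountLoop v d := by
  rw [pvCountLoop_pos (by omega)]
  have h1 : 1 ≤ v / 10 := by omega
  rw [pvCountLoop_pos (by omega)]
  have := pvCountLoop_ge (v / 10 / 10) (d + 1 + 1)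
  omega

theorem pvCountLoop_ge5 {v d : Int} (h : 10000 ≤ v) : d + 5 ≤ pvCountLoop v d := by
  rw [pvCountLoop_pos (by omega)]
  have h1 : 1000 ≤ v / 10 := by omega
  rw [pvCountLoop_pos (by omega)]
  have h2 : 100 ≤ v / 10 / 10 := by omega
  rw [pvCountLoop_pos (by omega)]
  have h3 : 10 ≤ v / 10 / 10 / 10 := by omega
  have := pvCountLoop_ge2 (d := d + 1 + 1 + 1) h3
  omega

theorem pvCountLoop_le1 {v d : Int} (h : v ≤ 9) : pvCountLoop v d ≤ d + 1 := by
  by_cases h0 : 0 < v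
  · rw [pvCountLoop_pos h0]
    rw [pvCountLoop_nonpos (show v / 10 ≤ 0 by omega)]
  · rw [pvCountLoop_nonpos (by omega)]; omega

theorem pvCountLoop_le3 {v d : Int} (h : v ≤ 999) : pvCountLoop v d ≤ d + 3 := by
  by_cases h0 : 0 < v
  · rw [pvCountLoop_pos h0]
    by_cases h1 : 0 < v / 10
    · rw [pvCountLoop_pos h1]
      have : pvCountLoop (v / 10 / 10) (d + 1 + 1) ≤ d + 1 + 1 + 1 :=
        pvCountLoop_le1 (by omega)
      omega
    · rw [pvCountLoop_nonpos (by omega)]; omega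
  · rw [pvCountLoop_nonpos (by omega)]; omega

theorem pvCountLoop_eq4 {v : Int} (h1 : 1000 ≤ v) (h2 : v ≤ 9999) :
    pvCountLoop v 0 = 4 := by
  rw [pvCountLoop_pos (by omega)]
  have q1 : 100 ≤ v / 10 ∧ v / 10 ≤ 999 := by omega
  rw [pvCountLoop_pos (by omega)]
  have q2 : 10 ≤ v / 10 / 10 ∧ v / 10 / 10 ≤ 99 := by omega
  rw [pvCountLoop_pos (by omega)]
  have q3 : 1 ≤ v / 10 / 10 / 10 ∧ v / 10 / 10 / 10 ≤ 9 := by omega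
  rw [pvCountLoop_pos (by omega)]
  rw [pvCountLoop_nonpos (show v / 10 / 10 / 10 / 10 ≤ 0 by omega)]
  norm_num

-- ===== VERDICT (by name: the statement is the Claim_ definition above) =====
theorem check_four_digits_value_spec : Claim_equal_check_four_digits_value := by
  intro value _
  unfold Spec_check_four_digits_value check_four_digits_value check_four_digits_value_alt
  by_cases hz : value = 0
  · subst hz
    simp [pvCountLoop_nonpos (le_refl (0:Int))]
  · simp only [hz, if_false]
    by_cases hneg : value ≤ 0
    · rw [pvCountLoop_nonpos hneg]
      simp; omega
    · by_cases hlow : value ≤ 999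
      · have := pvCountLoop_le3 (d := 0) hlow
        have := pvCountLoop_ge value 0
        simp [show ¬ pvCountLoop value 0 = 4 by omega]
        omega
      · by_cases hhi : value ≤ 9999
        · rw [pvCountLoop_eq4 (by omega) hhi]
          simp; omega
        · have := pvCountLoop_ge5 (d := 0) (show (10000:Int) ≤ value by omega)
          simp [show ¬ pvCountLoop value 0 = 4 by omega]
          omega
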